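-- pv_equiv track=rewrite | github.com/super-213/claw-agent | services/executor.py | _split_shell_segments
-- ===== SOURCE A (Python) =====
-- def _split_shell_segments(tokens: list[str]) -> list[list[str]]:
--     segments: list[list[str]] = []
--     current: list[str] = []
--     for token in tokens:
--         if token in {"&&", "||", ";", "|"}:
--             if current:
--                 segments.append(current)
--                 current = []
--         else:
--             current.append(token)
--     if current:
--         segments.append(current)
--     return segments
-- ===== SOURCE B (Python) =====
-- def _split_shell_segments(tokens: list[str]) -> list[list[str]]:
--     seps = {"&&", "||", ";", "|"}
--     segments: list[list[str]] = []
--     i, n = 0, len(tokens)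
--     while i < n:
--         if tokens[i] in seps:
--             i += 1
--         else:
--             j = i
--             while j < n and tokens[j] not in seps:
--                 j += 1
--             segments.append(tokens[i:j])
--             i = j
--     return segments
-- ===== Notes on version B (the rewrite author's own statement) =====
-- stated objective: alternative
-- what changed: Replaced the accumulate-current/flush-on-separator loop with an index scan that skips separator tokens and emits each maximal non-separator run as a slice in one step.
import Mathlib
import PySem

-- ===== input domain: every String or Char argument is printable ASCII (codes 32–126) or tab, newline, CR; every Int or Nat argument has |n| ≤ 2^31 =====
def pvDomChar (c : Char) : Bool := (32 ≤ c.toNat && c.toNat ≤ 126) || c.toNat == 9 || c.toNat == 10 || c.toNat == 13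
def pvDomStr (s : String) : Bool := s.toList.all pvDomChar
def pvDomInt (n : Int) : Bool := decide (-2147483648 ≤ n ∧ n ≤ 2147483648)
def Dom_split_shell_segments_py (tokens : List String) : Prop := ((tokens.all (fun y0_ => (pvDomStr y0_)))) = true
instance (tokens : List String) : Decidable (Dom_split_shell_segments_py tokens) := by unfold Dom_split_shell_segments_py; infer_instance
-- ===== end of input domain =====

-- B replaces A's accumulate/flush loop with a run-scan that emits each maximal
-- non-separator run at once (alternative decomposition; return value proved equal).

-- ===== PORT A =====
def pvIsSep (t : String) : Bool := t == "&&" || t == "||" || t == ";" || t == "|"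

-- loop over tokens carrying (segments, current); trailing flush at the end
def pvGoA (segs : List (List String)) (cur : List String) : List String → List (List String)
  | [] => if cur.isEmpty then segs else segs ++ [cur]
  | t :: ts =>
    if pvIsSep t then
      if cur.isEmpty then pvGoA segs cur ts else pvGoA (segs ++ [cur]) [] ts
    else pvGoA segs (cur ++ [t]) ts

def split_shell_segments_py (tokens : List String) : List (List String) :=
  pvGoA [] [] tokens

-- ===== PORT B =====
def split_shell_segments_py_alt : List String → List (List String)
  | [] => []
  | t :: ts =>
    if pvIsSep t then split_shell_segments_py_alt ts
    else (t :: ts.takeWhile (fun x => !pvIsSep x)) ::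
         split_shell_segments_py_alt (ts.dropWhile (fun x => !pvIsSep x))
termination_by l => l.length
decreasing_by
  · simp
  · have := List.length_dropWhile_le (fun x => !pvIsSep x) ts
    simp only [List.length_cons]
    omega

-- ===== PRECONDITION & SPEC =====
def Spec_split_shell_segments_py (tokens : List String) (out : List (List String)) : Prop := out = split_shell_segments_py_alt tokens
instance (tokens : List String) (out : List (List String)) : Decidable (Spec_split_shell_segments_py tokens out) := by unfold Spec_split_shell_segments_py; infer_instance

-- ===== CLAIM (what is proved, stated in full; the proofs are below) =====
def Claim_equal_split_shell_segments_py : Prop := ∀ (tokens : List String), Dom_split_shell_segments_py tokens → Spec_split_shell_segments_py tokens (split_shell_segments_py tokens)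

-- ===== LEMMAS AND PROOFS =====
theorem alt_nil : split_shell_segments_py_alt [] = [] := by
  rw [split_shell_segments_py_alt]

theorem alt_cons_sep (t : String) (ts : List String) (h : pvIsSep t = true) :
    split_shell_segments_py_alt (t :: ts) = split_shell_segments_py_alt ts := by
  rw [split_shell_segments_py_alt.eq_def]; simp [h]

theorem alt_cons_nonsep (t : String) (ts : List String) (h : ¬ pvIsSep t = true) :
    split_shell_segments_py_alt (t :: ts) =
      (t :: ts.takeWhile (fun x => !pvIsSep x)) ::
        split_shell_segments_py_alt (ts.dropWhile (fun x => !pvIsSep x)) := by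
  rw [split_shell_segments_py_alt.eq_def]; simp [h]

theorem pvGoA_eq (ts : List String) : ∀ (segs : List (List String)),
    (pvGoA segs [] ts = segs ++ split_shell_segments_py_alt ts) ∧
    (∀ cur : List String, cur ≠ [] →
      pvGoA segs cur ts =
        segs ++ (cur ++ ts.takeWhile (fun x => !pvIsSep x)) ::
          split_shell_segments_py_alt (ts.dropWhile (fun x => !pvIsSep x))) := by
  induction ts with
  | nil =>
    intro segs
    refine ⟨by simp [pvGoA, alt_nil], ?_⟩
    intro cur hc
    simp [pvGoA, List.isEmpty_iff, hc, alt_nil]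
  | cons t ts ih =>
    intro segs
    by_cases hsep : pvIsSep t = true
    · refine ⟨?_, ?_⟩
      · simp only [pvGoA, hsep, if_true, List.isEmpty_nil]
        rw [(ih segs).1, alt_cons_sep t ts hsep]
      · intro cur hc
        simp only [pvGoA, hsep, if_true, List.isEmpty_iff, hc]
        rw [(ih (segs ++ [cur])).1]
        simp [List.takeWhile, List.dropWhile, hsep, alt_cons_sep t ts hsep]
    · refine ⟨?_, ?_⟩
      · simp only [pvGoA, hsep, if_false, Bool.false_eq_true]
        show pvGoA segs [t] ts = segs ++ split_shell_segments_py_alt (t :: ts)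
        rw [(ih segs).2 [t] (by simp), alt_cons_nonsep t ts hsep]
        simp
      · intro cur hc
        simp only [pvGoA, hsep, if_false, Bool.false_eq_true]
        rw [(ih segs).2 (cur ++ [t]) (by simp)]
        simp [List.takeWhile, List.dropWhile, hsep]

-- ===== VERDICT (by name: the statement is the Claim_ definition above) =====
theorem split_shell_segments_py_spec : Claim_equal_split_shell_segments_py := by
  intro tokens _
  unfold Spec_split_shell_segments_py split_shell_segments_py
  rw [(pvGoA_eq tokens []).1]
  simp
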